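-- pv_equiv track=rewrite | github.com/tut-tuuut/advent-of-code-shiny-giggle | 2017/11/code.py | get_distance_from_path
-- ===== SOURCE A (Python) =====
-- def get_distance_from_path(path):
--     q, r, s = 0, 0, 0
--     for step in path.split(","):
--         if step == "n":
--             s += 1
--             r -= 1
--         elif step == "s":
--             r += 1
--             s -= 1
--         elif step == "ne":
--             r -= 1
--             q += 1
--         elif step == "se":
--             q += 1
--             s -= 1
--         elif step == "sw":
--             q -= 1
--             r += 1
--         elif step == "nw":
--             q -= 1
--             s += 1
--     return int((abs(q) + abs(r) + abs(s)) / 2)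
-- ===== SOURCE B (Python) =====
-- def get_distance_from_path(path):
--     c = {}
--     for step in path.split(","):
--         c[step] = c.get(step, 0) + 1
--
--     def n(k):
--         return c.get(k, 0)
--
--     q = n("ne") + n("se") - n("sw") - n("nw")
--     r = n("s") + n("sw") - n("n") - n("ne")
--     s = n("n") + n("nw") - n("s") - n("se")
--     return max(abs(q), abs(r), abs(s))
-- ===== Notes on version B (the rewrite author's own statement) =====
-- stated objective: alternative
-- what changed: B tallies the six direction tokens into a dict of counts in one pass, derives the net cube coordinates by fixed arithmetic on the counts, and returns max(|q|,|r|,|s|) (equal to (|q|+|r|+|s|)/2 since q+r+s=0), instead of A's per-step coordinate updates and halved-sum formula.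
import Mathlib
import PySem

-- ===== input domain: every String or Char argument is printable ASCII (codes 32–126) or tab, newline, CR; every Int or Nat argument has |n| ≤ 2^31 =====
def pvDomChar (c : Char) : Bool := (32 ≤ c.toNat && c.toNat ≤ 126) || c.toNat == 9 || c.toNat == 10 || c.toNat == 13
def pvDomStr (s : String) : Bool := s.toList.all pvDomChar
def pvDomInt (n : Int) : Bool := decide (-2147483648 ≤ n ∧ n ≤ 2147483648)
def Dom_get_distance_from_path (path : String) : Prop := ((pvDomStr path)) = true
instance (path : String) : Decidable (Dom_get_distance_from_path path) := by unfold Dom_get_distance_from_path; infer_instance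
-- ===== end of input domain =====

-- B replaces A's per-step coordinate updates with a one-pass token counter, closed-form
-- net coordinates from the counts, and max(|q|,|r|,|s|) instead of the halved abs-sum
-- (equal since q+r+s=0); objective: alternative decomposition, same O(n) cost.

-- ===== PORT A =====
-- A walks the token list updating cube coordinates, then returns int((|q|+|r|+|s|)/2).
-- Int division is exact here: the accumulated |q|+|r|+|s| is even and nonnegative, so
-- Python's float division + int() equals integer division.
-- the loop body of A (one step of the for-loop)
def pvStepA (acc : Int × Int × Int) (step : String) : Int × Int × Int :=
  let q := acc.1; let r := acc.2.1; let s := acc.2.2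
  if step = "n" then (q, r - 1, s + 1)
  else if step = "s" then (q, r + 1, s - 1)
  else if step = "ne" then (q + 1, r - 1, s)
  else if step = "se" then (q + 1, r, s - 1)
  else if step = "sw" then (q - 1, r + 1, s)
  else if step = "nw" then (q - 1, r, s + 1)
  else (q, r, s)

def get_distance_from_path (path : String) : Int :=
  let st := ((PySem.Chars.splitOn path.toList [',']).map String.ofList).foldl pvStepA (0, 0, 0)
  (|st.1| + |st.2.1| + |st.2.2|) / 2

-- ===== PORT B =====
def get_distance_from_path_alt (path : String) : Int :=
  let c : PySem.Dict String Int :=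
    ((PySem.Chars.splitOn path.toList [',']).map String.ofList).foldl (fun d step => d.modify step 0 (· + 1)) (PySem.Dict.empty)
  let n : String → Int := fun k => c.getD k 0
  let q := n "ne" + n "se" - n "sw" - n "nw"
  let r := n "s" + n "sw" - n "n" - n "ne"
  let s := n "n" + n "nw" - n "s" - n "se"
  max |q| (max |r| |s|)

-- ===== PRECONDITION & SPEC =====
def Spec_get_distance_from_path (path : String) (out : Int) : Prop := out = get_distance_from_path_alt path
instance (path : String) (out : Int) : Decidable (Spec_get_distance_from_path path out) := by unfold Spec_get_distance_from_path; infer_instance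

-- ===== CLAIM (what is proved, stated in full; the proofs are below) =====
def Claim_equal_get_distance_from_path : Prop := ∀ (path : String), Dom_get_distance_from_path path → Spec_get_distance_from_path path (get_distance_from_path path)

-- ===== LEMMAS AND PROOFS =====

-- the net coordinates after A's loop, expressed through token counts
theorem pvFoldA_eq (l : List String) (q r s : Int) :
    l.foldl pvStepA (q, r, s)
    = (q + l.count "ne" + l.count "se" - l.count "sw" - l.count "nw",
       r + l.count "s" + l.count "sw" - l.count "n" - l.count "ne",
       s + l.count "n" + l.count "nw" - l.count "s" - l.count "se") := by
  induction l generalizing q r s with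
  | nil => simp
  | cons t l ih =>
    rw [List.foldl_cons]
    conv_lhs => rw [pvStepA.eq_def]
    split_ifs with h1 h2 h3 h4 h5 h6
    · subst h1; rw [ih]; simp [List.count_cons, Prod.ext_iff] <;> (push_cast; omega)
    · subst h2; rw [ih]; simp [List.count_cons, Prod.ext_iff] <;> (push_cast; omega)
    · subst h3; rw [ih]; simp [List.count_cons, Prod.ext_iff] <;> (push_cast; omega)
    · subst h4; rw [ih]; simp [List.count_cons, Prod.ext_iff] <;> (push_cast; omega)
    · subst h5; rw [ih]; simp [List.count_cons, Prod.ext_iff] <;> (push_cast; omega)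
    · subst h6; rw [ih]; simp [List.count_cons, Prod.ext_iff] <;> (push_cast; omega)
    · rw [ih]
      simp [List.count_cons, Prod.ext_iff, h1, h2, h3, h4, h5, h6]

theorem pvHalfSum_eq_max (q r s : Int) (h : q + r + s = 0) :
    (|q| + |r| + |s|) / 2 = max |q| (max |r| |s|) := by
  rcases abs_cases q with ⟨hq, _⟩ | ⟨hq, _⟩ <;>
    rcases abs_cases r with ⟨hr, _⟩ | ⟨hr, _⟩ <;>
    rcases abs_cases s with ⟨hs, _⟩ | ⟨hs, _⟩ <;>
    rw [max_def, max_def] <;> split_ifs <;> omega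

-- ===== VERDICT (by name: the statement is the Claim_ definition above) =====
theorem get_distance_from_path_spec : Claim_equal_get_distance_from_path := by
  intro path _
  unfold Spec_get_distance_from_path get_distance_from_path get_distance_from_path_alt
  simp only [pvFoldA_eq, PySem.Dict.getD_foldl_modify_add_one, PySem.Dict.getD_empty]
  rw [pvHalfSum_eq_max]
  · ring_nf
  · ring
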